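-- pv_equiv track=rewrite | github.com/Thormes/advent-of-code | 2024/day9/day9_solution.py | get_next_free_space_b
-- ===== SOURCE A (Python) =====
-- from typing import List, Optional
--
-- def get_next_free_space_b(free_map: dict[int, int], size: int, pos_id) -> Optional[int]:
--     for key in sorted(free_map.keys()):
--         free_map[key] = free_map.pop(key)
--     for pos, free_space in free_map.items():
--         if free_space >= size and pos < pos_id:
--             free_map[pos + size] = free_map[pos] - size
--             del free_map[pos]
--             return pos
--
--     return None
-- ===== SOURCE B (Python) =====
-- def get_next_free_space_b(free_map: dict[int, int], size: int, pos_id) -> 'Optional[int]':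
--     # One O(n) pass: minimum position with enough free space before pos_id.
--     best = None
--     for pos, free_space in free_map.items():
--         if free_space >= size and pos < pos_id and (best is None or pos < best):
--             best = pos
--     if best is not None:
--         free_map[best + size] = free_map[best] - size
--         del free_map[best]
--     return best
-- ===== Notes on version B (the rewrite author's own statement) =====
-- stated objective: faster
-- what changed: A re-inserts every key in sorted order and scans the re-sorted dict for the first fit; B does a single unsorted pass keeping the minimum qualifying position, so the sort and the re-insertion loop disappear (equivalence is about the return value; A additionally reorders the whole dict in place, B only performs the same split mutation).
import Mathlib
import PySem

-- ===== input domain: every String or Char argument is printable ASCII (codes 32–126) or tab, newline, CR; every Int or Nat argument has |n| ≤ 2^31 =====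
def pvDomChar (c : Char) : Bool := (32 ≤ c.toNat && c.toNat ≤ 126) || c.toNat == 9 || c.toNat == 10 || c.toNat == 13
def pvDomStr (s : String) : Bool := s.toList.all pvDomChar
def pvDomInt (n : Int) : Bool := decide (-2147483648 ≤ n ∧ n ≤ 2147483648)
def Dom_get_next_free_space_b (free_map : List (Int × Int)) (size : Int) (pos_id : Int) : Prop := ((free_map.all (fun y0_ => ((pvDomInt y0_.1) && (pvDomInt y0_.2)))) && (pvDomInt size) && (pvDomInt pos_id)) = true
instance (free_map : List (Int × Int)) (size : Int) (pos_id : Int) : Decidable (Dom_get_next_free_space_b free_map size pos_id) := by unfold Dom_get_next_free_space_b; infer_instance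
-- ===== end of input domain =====

-- B replaces A's sort-and-rescan of the dict by a single min-scan (O(n) vs O(n log n));
-- equivalence is about the RETURN value: A also reorders the whole dict in place, B performs only the same split mutation.

-- ===== PORT A =====
-- free_map[key] = free_map.pop(key)   (key always present; the none branch is unreachable)
def pvSortStep (d : PySem.Dict Int Int) (key : Int) : PySem.Dict Int Int :=
  match d.pop? key with
  | some (v, d') => d'.insert key v
  | none => d

-- for pos, free_space in free_map.items(): if free_space >= size and pos < pos_id: …; return pos
def pvFindLoop (size pos_id : Int) : List (Int × Int) → Option Int
  | [] => none
  | p :: rest => if size ≤ p.2 ∧ p.1 < pos_id then some p.1 else pvFindLoop size pos_id rest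

def get_next_free_space_b (free_map : List (Int × Int)) (size : Int) (pos_id : Int) : Option Int :=
  let d0 := PySem.Dict.ofList free_map
  let d1 := (PySem.List.sorted d0.keys (fun k => k) false).foldl pvSortStep d0
  pvFindLoop size pos_id d1.items

-- ===== PORT B =====
def pvMinStep (size pos_id : Int) (best : Option Int) (p : Int × Int) : Option Int :=
  if decide (size ≤ p.2) && decide (p.1 < pos_id) && best.all (fun b => decide (p.1 < b)) then
    some p.1
  else best

def get_next_free_space_b_alt (free_map : List (Int × Int)) (size : Int) (pos_id : Int) : Option Int :=
  (PySem.Dict.ofList free_map).items.foldl (pvMinStep size pos_id) none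

-- ===== PRECONDITION & SPEC =====
def Spec_get_next_free_space_b (free_map : List (Int × Int)) (size : Int) (pos_id : Int) (out : Option Int) : Prop := out = get_next_free_space_b_alt free_map size pos_id
instance (free_map : List (Int × Int)) (size : Int) (pos_id : Int) (out : Option Int) : Decidable (Spec_get_next_free_space_b free_map size pos_id out) := by unfold Spec_get_next_free_space_b; infer_instance

-- ===== CLAIM (what is proved, stated in full; the proofs are below) =====
def Claim_equal_get_next_free_space_b : Prop := ∀ (free_map : List (Int × Int)) (size : Int) (pos_id : Int), Dom_get_next_free_space_b free_map size pos_id → Spec_get_next_free_space_b free_map size pos_id (get_next_free_space_b free_map size pos_id)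

-- ===== LEMMAS AND PROOFS =====

theorem pv_get?_erase_of_ne (d : PySem.Dict Int Int) (k k' : Int) (h : k' ≠ k) :
    (d.erase k).get? k' = d.get? k' := by
  obtain ⟨items⟩ := d
  simp only [PySem.Dict.erase, PySem.Dict.get?, List.find?_filter]
  have hpred : ∀ p : Int × Int,
      (decide (((!(p.1 == k)) = true) ∧ ((p.1 == k') = true))) = (p.1 == k') := by
    intro p
    by_cases hp : p.1 = k'
    · simp [hp, h]
    · simp [hp]
  simp only [hpred]

-- the re-insertion loop: processed keys move to the back (in ks order) with their values kept
theorem pv_sortloop_items (ks : List Int) :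
    ∀ (d : PySem.Dict Int Int), ks.Nodup → (∀ k ∈ ks, d.contains k) →
    (ks.foldl pvSortStep d).items
      = d.items.filter (fun p => !ks.contains p.1) ++ ks.map (fun k => (k, d.getD k 0)) := by
  induction ks with
  | nil => intro d _ _; simp
  | cons k t ih =>
    intro d hnd hc
    have hck : d.contains k := hc k (by simp)
    obtain ⟨v, hv⟩ : ∃ v, d.get? k = some v := by
      have := PySem.Dict.contains_eq_isSome_get? d k
      rw [hck] at this
      exact Option.isSome_iff_exists.mp this.symm
    have hstep : pvSortStep d k = (d.erase k).insert k v := by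
      simp [pvSortStep, PySem.Dict.pop?, hv]
    have hecont : (d.erase k).contains k = false := by
      rw [PySem.Dict.contains_eq_isSome_get?]
      simp [PySem.Dict.erase, PySem.Dict.get?, List.find?_filter]
    have hitems : (pvSortStep d k).items = (d.items.filter (fun p => !p.1 == k)) ++ [(k, v)] := by
      rw [hstep, PySem.Dict.items_insert_of_not_contains _ v hecont]
      rfl
    have hget' : ∀ k' ∈ t, (pvSortStep d k).get? k' = d.get? k' := by
      intro k' hk'
      have hne : k' ≠ k := by rintro rfl; exact (List.nodup_cons.mp hnd).1 hk'
      rw [hstep, PySem.Dict.get?_insert_of_ne _ v hne, pv_get?_erase_of_ne _ _ _ hne]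
    have hcont' : ∀ k' ∈ t, (pvSortStep d k).contains k' := by
      intro k' hk'
      rw [PySem.Dict.contains_eq_isSome_get?, hget' k' hk',
        ← PySem.Dict.contains_eq_isSome_get?]
      exact hc k' (by simp [hk'])
    have hgetD' : ∀ k' ∈ t, (pvSortStep d k).getD k' 0 = d.getD k' 0 := by
      intro k' hk'
      rw [PySem.Dict.getD_eq_get?_getD, PySem.Dict.getD_eq_get?_getD, hget' k' hk']
    rw [List.foldl_cons, ih (pvSortStep d k) (List.nodup_cons.mp hnd).2 hcont']
    rw [hitems]
    have hknt : t.contains k = false := by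
      simpa using (List.nodup_cons.mp hnd).1
    rw [List.filter_append, List.filter_filter]
    simp only [List.filter_cons, hknt]
    have hval : d.getD k 0 = v := PySem.Dict.getD_of_get?_eq_some d 0 hv
    have hfilt : d.items.filter (fun p => !t.contains p.1 && !p.1 == k)
        = d.items.filter (fun p => !(k :: t).contains p.1) := by
      apply List.filter_congr
      intro p _
      by_cases h1 : p.1 = k
      · simp [h1]
      · by_cases h2 : t.contains p.1 <;> simp [h1]
    have hmap : t.map (fun k' => (k', (pvSortStep d k).getD k' 0))
        = t.map (fun k' => (k', d.getD k' 0)) := by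
      apply List.map_congr_left
      intro k' hk'
      rw [hgetD' k' hk']
    simp only [hfilt, hmap]
    simp
    exact hval.symm

-- characterisation of A's scan on a key-sorted list
theorem pv_findLoop_spec (size pos_id : Int) (l : List (Int × Int))
    (hs : l.Pairwise (fun a b => a.1 ≤ b.1)) :
    (pvFindLoop size pos_id l = none ↔ ∀ p ∈ l, ¬(size ≤ p.2 ∧ p.1 < pos_id)) ∧
    (∀ m, pvFindLoop size pos_id l = some m →
      (∃ p ∈ l, (size ≤ p.2 ∧ p.1 < pos_id) ∧ p.1 = m) ∧
      (∀ p ∈ l, (size ≤ p.2 ∧ p.1 < pos_id) → m ≤ p.1)) := by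
  induction l with
  | nil => simp [pvFindLoop]
  | cons p t ih =>
    obtain ⟨hp, ht⟩ := List.pairwise_cons.mp hs
    obtain ⟨ih1, ih2⟩ := ih ht
    by_cases hq : size ≤ p.2 ∧ p.1 < pos_id
    · constructor
      · constructor
        · intro h; simp [pvFindLoop, hq] at h
        · intro h; exact absurd hq (h p (by simp))
      · intro m hm
        simp [pvFindLoop, hq] at hm
        subst hm
        refine ⟨⟨p, by simp, hq, rfl⟩, ?_⟩
        intro q hq' _
        rcases List.mem_cons.mp hq' with rfl | hmem
        · exact le_refl _
        · exact hp q hmem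
    · constructor
      · simp only [pvFindLoop, if_neg hq]
        rw [ih1]
        constructor
        · intro h q hq'
          rcases List.mem_cons.mp hq' with rfl | hmem
          · exact hq
          · exact h q hmem
        · intro h q hq'; exact h q (by simp [hq'])
      · intro m hm
        simp only [pvFindLoop, if_neg hq] at hm
        obtain ⟨⟨q, hq', hqq, hkey⟩, hmin⟩ := ih2 m hm
        refine ⟨⟨q, by simp [hq'], hqq, hkey⟩, ?_⟩
        intro r hr hrq
        rcases List.mem_cons.mp hr with rfl | hmem
        · exact absurd hrq hq
        · exact hmin r hmem hrq

-- how one step of B's scan behaves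
theorem pvMinStep_of_qual (size pos_id : Int) (acc : Option Int) (p : Int × Int)
    (hq : size ≤ p.2 ∧ p.1 < pos_id) :
    pvMinStep size pos_id acc p = some (acc.elim p.1 (fun b => min b p.1)) := by
  cases acc with
  | none => simp [pvMinStep, hq.1, hq.2]
  | some b =>
    by_cases hb : p.1 < b
    · simp [pvMinStep, hq.1, hq.2, hb]
      omega
    · simp [pvMinStep, hq.1, hq.2, hb]
      omega

theorem pvMinStep_of_not_qual (size pos_id : Int) (acc : Option Int) (p : Int × Int)
    (hq : ¬(size ≤ p.2 ∧ p.1 < pos_id)) :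
    pvMinStep size pos_id acc p = acc := by
  cases acc with
  | none =>
    simp only [pvMinStep, Option.all_none, Bool.and_true]
    rw [if_neg]
    simp only [Bool.and_eq_true, decide_eq_true_eq, not_and]
    exact fun h1 h2 => hq ⟨h1, h2⟩
  | some b =>
    simp only [pvMinStep, Option.all_some]
    rw [if_neg]
    simp only [Bool.and_eq_true, decide_eq_true_eq, not_and]
    exact fun h1 => absurd h1 hq

-- characterisation of B's min-scan on an arbitrary list
theorem pv_fold_spec (size pos_id : Int) (l : List (Int × Int)) :
    ∀ (acc : Option Int),
    (l.foldl (pvMinStep size pos_id) acc = none ↔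
      acc = none ∧ ∀ p ∈ l, ¬(size ≤ p.2 ∧ p.1 < pos_id)) ∧
    (∀ m, l.foldl (pvMinStep size pos_id) acc = some m →
      ((acc = some m ∨ ∃ p ∈ l, (size ≤ p.2 ∧ p.1 < pos_id) ∧ p.1 = m) ∧
       (∀ b, acc = some b → m ≤ b) ∧
       (∀ p ∈ l, (size ≤ p.2 ∧ p.1 < pos_id) → m ≤ p.1))) := by
  induction l with
  | nil =>
    intro acc
    refine ⟨by simp, ?_⟩
    intro m hm
    simp only [List.foldl_nil] at hm
    subst hm
    refine ⟨Or.inl rfl, fun b hb => ?_, by simp⟩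
    injection hb with hb'
    omega
  | cons p t ih =>
    intro acc
    simp only [List.foldl_cons]
    obtain ⟨ih1, ih2⟩ := ih (pvMinStep size pos_id acc p)
    by_cases hq : size ≤ p.2 ∧ p.1 < pos_id
    · rw [pvMinStep_of_qual size pos_id acc p hq] at ih1 ih2 ⊢
      constructor
      · rw [ih1]
        constructor
        · rintro ⟨h, -⟩; cases h
        · rintro ⟨-, h⟩; exact absurd hq (h p (by simp))
      · intro m hm
        obtain ⟨hsrc, hle, hmin⟩ := ih2 m hm
        have hle' : m ≤ acc.elim p.1 (fun b => min b p.1) := hle _ rfl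
        cases acc with
        | none =>
          simp only [Option.elim] at hsrc hle'
          refine ⟨?_, fun b hb => absurd hb (by simp), ?_⟩
          · right
            rcases hsrc with h | ⟨q, hq', hqq, hkey⟩
            · exact ⟨p, by simp, hq, Option.some.inj h⟩
            · exact ⟨q, by simp [hq'], hqq, hkey⟩
          · intro q hq' hqq
            rcases List.mem_cons.mp hq' with rfl | hmem
            · exact hle'
            · exact hmin q hmem hqq
        | some b =>
          simp only [Option.elim] at hsrc hle'
          refine ⟨?_, ?_, ?_⟩
          · rcases hsrc with h | ⟨q, hq', hqq, hkey⟩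
            · injection h with h'
              by_cases hcmp : p.1 ≤ b
              · right
                refine ⟨p, by simp, hq, ?_⟩
                omega
              · left
                have : b = m := by omega
                rw [this]
            · right; exact ⟨q, by simp [hq'], hqq, hkey⟩
          · intro b' hb'
            injection hb' with hb''
            omega
          · intro q hq' hqq
            rcases List.mem_cons.mp hq' with rfl | hmem
            · omega
            · exact hmin q hmem hqq
    · rw [pvMinStep_of_not_qual size pos_id acc p hq] at ih1 ih2 ⊢
      constructor
      · rw [ih1]
        constructor
        · rintro ⟨ha, h⟩
          refine ⟨ha, fun q hq' => ?_⟩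
          rcases List.mem_cons.mp hq' with rfl | hmem
          · exact hq
          · exact h q hmem
        · rintro ⟨ha, h⟩
          exact ⟨ha, fun q hq' => h q (by simp [hq'])⟩
      · intro m hm
        obtain ⟨hsrc, hle, hmin⟩ := ih2 m hm
        refine ⟨?_, hle, ?_⟩
        · rcases hsrc with h | ⟨q, hq', hqq, hkey⟩
          · exact Or.inl h
          · exact Or.inr ⟨q, by simp [hq'], hqq, hkey⟩
        · intro q hq' hqq
          rcases List.mem_cons.mp hq' with rfl | hmem
          · exact absurd hqq hq
          · exact hmin q hmem hqq

-- ===== VERDICT (by name: the statement is the Claim_ definition above) =====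
theorem get_next_free_space_b_spec : Claim_equal_get_next_free_space_b := by
  intro free_map size pos_id _
  unfold Spec_get_next_free_space_b get_next_free_space_b get_next_free_space_b_alt
  set d0 := PySem.Dict.ofList free_map with hd0
  have hnd : d0.keys.Nodup := PySem.Dict.nodup_keys_ofList free_map
  set ks := PySem.List.sorted d0.keys (fun k => k) false with hks
  have hperm : ks.Perm d0.keys := PySem.List.sorted_perm d0.keys (fun k => k) false
  have hksnd : ks.Nodup := hperm.nodup_iff.mpr hnd
  have hkscont : ∀ k ∈ ks, d0.contains k := by
    intro k hk
    exact (PySem.Dict.contains_iff_mem_keys d0 k).mpr (hperm.mem_iff.mp hk)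
  have hitems := pv_sortloop_items ks d0 hksnd hkscont
  have hempty : d0.items.filter (fun p => !ks.contains p.1) = [] := by
    apply List.filter_eq_nil_iff.mpr
    intro p hp
    have : p.1 ∈ d0.keys := PySem.Dict.mem_keys_of_mem_items d0 hp
    simp [hperm.mem_iff.mpr this]
  rw [hempty, List.nil_append] at hitems
  change pvFindLoop size pos_id (ks.foldl pvSortStep d0).items = d0.items.foldl (pvMinStep size pos_id) none
  -- the re-sorted items list: key-sorted, and a permutation of d0.items
  set lA := ks.map (fun k => (k, d0.getD k 0)) with hlA
  have hsorted : lA.Pairwise (fun a b => a.1 ≤ b.1) := by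
    rw [hlA]
    apply List.Pairwise.map
    · intro a b h; exact h
    · exact PySem.List.sorted_pairwise d0.keys (fun k => k)
  have hitems0 : d0.items = d0.keys.map (fun k => (k, d0.getD k 0)) :=
    PySem.Dict.items_eq_map_keys d0 hnd 0
  have hpermItems : lA.Perm d0.items := by
    rw [hlA, hitems0]
    exact hperm.map _
  obtain ⟨hAnone, hAsome⟩ := pv_findLoop_spec size pos_id lA hsorted
  obtain ⟨hBnone, hBsome⟩ := pv_fold_spec size pos_id d0.items none
  rw [hitems]
  cases hA : pvFindLoop size pos_id lA with
  | none =>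
    cases hB : d0.items.foldl (pvMinStep size pos_id) none with
    | none => rfl
    | some m =>
      obtain ⟨hsrc, _, _⟩ := hBsome m hB
      rcases hsrc with h | ⟨q, hq', hqq, _⟩
      · cases h
      · exact absurd hqq (hAnone.mp hA q (hpermItems.mem_iff.mpr hq'))
  | some m =>
    obtain ⟨⟨q, hq', hqq, hkey⟩, hminA⟩ := hAsome m hA
    cases hB : d0.items.foldl (pvMinStep size pos_id) none with
    | none =>
      exact absurd hqq ((hBnone.mp hB).2 q (hpermItems.mem_iff.mp hq'))
    | some m' =>
      obtain ⟨hsrc, _, hminB⟩ := hBsome m' hB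
      rcases hsrc with h | ⟨r, hr, hrq, hrkey⟩
      · cases h
      · have h1 : m ≤ r.1 := hminA r (hpermItems.mem_iff.mpr hr) hrq
        have h2 : m' ≤ q.1 := hminB q (hpermItems.mem_iff.mp hq') hqq
        congr 1
        omega
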